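-- pv_equiv track=rewrite | github.com/tomtang110/comp9021 | quzzi/quiz-3/quiz3_try.py | judge_S
-- ===== SOURCE A (Python) =====
-- def panduan(n,grid):
--     try:
--         count_n=0
--         n_len = len(n)
--         for each in n:
--             if grid[each[0]][each[1]] == 1:
--                 count_n += 1
--             else:
--                 count_n += 0
--         if n_len == count_n:
--             return True
--         else:
--             return False
--     except IndexError:
--         return False
--
-- def judge_S(a0,grid,L=1,count=1):
--     a11=a0[0]
--     b11=a0[1]
--     if b11 > 0 :
--
--         a12 = a11-1
--         b12 = b11 - 1
--         if a11 >= 0: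
--             n = L*2
--             b13 =  n +1
--             L += 1
--             new =[]
--             a1=(a12,b12)
--             for each_element in range(0,b13):
--                 new.append([a12,b12+each_element])
--             panduan2 = panduan(new,grid)
--             if panduan2:
--                 return count + judge_S(a1,grid,L,count)
--             else:
--                 return 0
--         else:
--             return 0
--     else:
--         return 0
-- ===== SOURCE B (Python) =====
-- def panduan(n,grid):
--     try:
--         count_n=0
--         n_len = len(n)
--         for each in n:
--             if grid[each[0]][each[1]] == 1:
--                 count_n += 1
--             else:
--                 count_n += 0
--         if n_len == count_n:
--             return True
--         else:
--             return False
--     except IndexError: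
--         return False
--
-- def judge_S(a0, grid, L=1, count=1):
--     a11, b11 = a0
--     total = 0
--     while True:
--         if b11 <= 0 or a11 < 0:
--             return total
--         a12, b12 = a11 - 1, b11 - 1
--         row = [[a12, b12 + k] for k in range(2 * L + 1)]
--         if not panduan(row, grid):
--             return total
--         total += count
--         a11, b11, L = a12, b12, L + 1
-- ===== Notes on version B (the rewrite author's own statement) =====
-- stated objective: alternative
-- what changed: Replaces A's recursion (each call returns count + recursive call, 0 at every exit) by a single iterative while-loop that maintains the running total and returns it at each exit; panduan is kept unchanged.
import Mathlib
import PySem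

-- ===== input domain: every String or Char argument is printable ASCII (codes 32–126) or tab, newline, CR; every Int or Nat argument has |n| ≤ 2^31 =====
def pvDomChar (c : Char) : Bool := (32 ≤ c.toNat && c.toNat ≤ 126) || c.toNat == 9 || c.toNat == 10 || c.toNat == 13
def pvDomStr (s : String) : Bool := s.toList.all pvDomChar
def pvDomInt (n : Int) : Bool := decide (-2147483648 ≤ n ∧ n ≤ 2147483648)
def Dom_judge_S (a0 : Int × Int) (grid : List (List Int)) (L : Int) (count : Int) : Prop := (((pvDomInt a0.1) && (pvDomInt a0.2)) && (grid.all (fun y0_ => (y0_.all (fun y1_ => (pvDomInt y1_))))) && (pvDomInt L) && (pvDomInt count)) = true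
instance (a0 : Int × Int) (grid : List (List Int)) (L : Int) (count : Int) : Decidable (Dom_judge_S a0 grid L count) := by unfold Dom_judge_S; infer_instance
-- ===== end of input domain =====

-- Header: B replaces A's recursion (count + recurse, 0 at every exit) by an iterative
-- accumulator loop returning the running total at each exit; objective: alternative decomposition.

-- ===== PORT A =====
-- shared helper: literal port of panduan (try/except IndexError -> Option; negative indices wrap via pyGet?)
def pvPanLoop (grid : List (List Int)) : List (Int × Int) → Int → Option Int
  | [], c => some c
  | e :: rest, c =>
    match PySem.List.pyGet? grid e.1 with
    | none => none
    | some row =>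
      match PySem.List.pyGet? row e.2 with
      | none => none
      | some v => pvPanLoop grid rest (if v = 1 then c + 1 else c + 0)

def pvPanduan (n : List (Int × Int)) (grid : List (List Int)) : Bool :=
  match pvPanLoop grid n 0 with
  | none => false                                  -- IndexError path
  | some count_n => decide ((n.length : Int) = count_n)

def judge_S (a0 : Int × Int) (grid : List (List Int)) (L : Int) (count : Int) : Int :=
  let a11 := a0.1
  let b11 := a0.2
  if b11 > 0 then
    let a12 := a11 - 1
    let b12 := b11 - 1
    if a11 ≥ 0 then
      let n := L * 2
      let b13 := n + 1
      let new := (PySem.List.pyRange 0 b13 1).foldl (fun acc e => acc ++ [(a12, b12 + e)]) []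
      let panduan2 := pvPanduan new grid
      if panduan2 then count + judge_S (a12, b12) grid (L + 1) count else 0
    else 0
  else 0
termination_by a0.2.toNat
decreasing_by omega

-- ===== PORT B =====
def pvAltLoop (grid : List (List Int)) (count : Int) (a11 b11 L total : Int) : Int :=
  if b11 ≤ 0 ∨ a11 < 0 then total
  else
    let a12 := a11 - 1
    let b12 := b11 - 1
    let row := (PySem.List.pyRange 0 (2 * L + 1) 1).map (fun k => (a12, b12 + k))
    if pvPanduan row grid then pvAltLoop grid count a12 b12 (L + 1) (total + count) else total
termination_by b11.toNat
decreasing_by omega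

def judge_S_alt (a0 : Int × Int) (grid : List (List Int)) (L : Int) (count : Int) : Int :=
  pvAltLoop grid count a0.1 a0.2 L 0

-- ===== PRECONDITION & SPEC =====
def Spec_judge_S (a0 : Int × Int) (grid : List (List Int)) (L : Int) (count : Int) (out : Int) : Prop := out = judge_S_alt a0 grid L count
instance (a0 : Int × Int) (grid : List (List Int)) (L : Int) (count : Int) (out : Int) : Decidable (Spec_judge_S a0 grid L count out) := by unfold Spec_judge_S; infer_instance

-- ===== CLAIM (what is proved, stated in full; the proofs are below) =====
def Claim_equal_judge_S : Prop := ∀ (a0 : Int × Int) (grid : List (List Int)) (L : Int) (count : Int), Dom_judge_S a0 grid L count → Spec_judge_S a0 grid L count (judge_S a0 grid L count)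

-- ===== LEMMAS AND PROOFS =====
theorem pv_foldl_app {α β : Type} (f : α → β) :
    ∀ (xs : List α) (acc : List β),
      xs.foldl (fun a e => a ++ [f e]) acc = acc ++ xs.map f
  | [], acc => by simp
  | x :: xs, acc => by simp [List.foldl, pv_foldl_app f xs]

theorem pv_loop_eq (grid : List (List Int)) :
    ∀ (fuel : Nat) (a11 b11 L count total : Int), b11.toNat ≤ fuel →
      pvAltLoop grid count a11 b11 L total = total + judge_S (a11, b11) grid L count := by
  intro fuel
  induction fuel with
  | zero =>
    intro a11 b11 L count total h
    rw [pvAltLoop.eq_def, judge_S.eq_def]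
    have hb : b11 ≤ 0 := by omega
    simp [hb, show ¬ b11 > 0 by omega]
  | succ n ih =>
    intro a11 b11 L count total h
    rw [pvAltLoop.eq_def, judge_S.eq_def]
    by_cases hb : b11 ≤ 0
    · simp [hb, show ¬ b11 > 0 by omega]
    · by_cases ha : a11 < 0
      · simp [hb, ha, show ¬ a11 ≥ 0 by omega, show b11 > 0 by omega]
      · have hrow : (PySem.List.pyRange 0 (2 * L + 1) 1).map
            (fun k => (a11 - 1, b11 - 1 + k)) =
            (PySem.List.pyRange 0 (L * 2 + 1) 1).foldl
              (fun acc e => acc ++ [(a11 - 1, b11 - 1 + e)]) [] := by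
          rw [pv_foldl_app, show L * 2 + 1 = 2 * L + 1 by ring]
          simp
        simp only [hb, ha, show b11 > 0 by omega, show a11 ≥ 0 by omega,
          or_self, if_false, if_pos]
        rw [hrow]
        by_cases hp : pvPanduan ((PySem.List.pyRange 0 (L * 2 + 1) 1).foldl
            (fun acc e => acc ++ [(a11 - 1, b11 - 1 + e)]) []) grid
        · rw [if_pos hp, if_pos hp, ih _ _ _ _ _ (by omega)]
          ring
        · rw [if_neg hp, if_neg hp]
          ring

-- ===== VERDICT (by name: the statement is the Claim_ definition above) =====
theorem judge_S_spec : Claim_equal_judge_S := by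
  intro a0 grid L count _
  unfold Spec_judge_S judge_S_alt
  rw [pv_loop_eq grid a0.2.toNat a0.1 a0.2 L count 0 (le_refl _)]
  simp
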